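-- pv_equiv track=rewrite | github.com/Synrom/pytools | bughunter/strip.py | strip_calls
-- ===== SOURCE A (Python) =====
-- def strip_calls(content):
--     ncontent = ""
--     com = 0
--     i = 0
--     while i < len(content):
--         if com == 0:
--             ncontent += content[i]
--         if content[i] == "(":
--             com += 1
--         if content[i] == ")":
--             com -= 1
--             if com == 0:
--                 ncontent += content[i]
--         i += 1
--     return ncontent
-- ===== SOURCE B (Python) =====
-- def strip_calls(content):
--     depth = 0
--     depths = []
--     for c in content:
--         depths.append(depth)
--         depth += (c == "(") - (c == ")")
--     return "".join(c for c, d in zip(content, depths)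
--                    if d == 0 or (c == ")" and d == 1))
-- ===== Notes on version B (the rewrite author's own statement) =====
-- stated objective: faster
-- what changed: Replaces A's single stateful loop that appends to a string inside branch logic with a two-phase decomposition: first a prefix-depth table, then a pure filter keeping each char iff its prefix depth is 0 or it is a closing paren at depth 1.
import Mathlib
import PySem

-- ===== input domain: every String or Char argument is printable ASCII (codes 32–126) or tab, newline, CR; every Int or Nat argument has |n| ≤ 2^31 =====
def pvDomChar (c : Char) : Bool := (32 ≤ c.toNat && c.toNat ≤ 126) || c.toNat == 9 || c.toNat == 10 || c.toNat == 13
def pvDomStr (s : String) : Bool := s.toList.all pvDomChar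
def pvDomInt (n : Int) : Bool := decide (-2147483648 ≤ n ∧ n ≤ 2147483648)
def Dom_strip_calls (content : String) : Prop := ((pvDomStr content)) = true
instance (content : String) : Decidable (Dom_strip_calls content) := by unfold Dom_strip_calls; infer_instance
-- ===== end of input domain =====

-- B replaces A's single stateful append-inside-branches loop with a prefix-depth
-- table followed by a pure filter (alternative decomposition, same exact output).

-- ===== PORT A =====
-- A's while-loop over indices, transcribed as structural recursion over the
-- characters, threading the accumulated output `ncontent` and counter `com`.
def stripLoopA : List Char → List Char → Int → List Char
  | [], ncontent, _ => ncontent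
  | c :: rest, ncontent, com =>
    let n1 := if com == 0 then ncontent ++ [c] else ncontent
    let com1 := if c == '(' then com + 1 else com
    if c == ')' then
      let com2 := com1 - 1
      let n2 := if com2 == 0 then n1 ++ [c] else n1
      stripLoopA rest n2 com2
    else
      stripLoopA rest n1 com1

def strip_calls (content : String) : String :=
  String.mk (stripLoopA content.toList [] 0)

-- ===== PORT B =====
-- phase 1: prefix-depth table depths[i] = depth before char i
def depthTable : List Char → Int → List Int
  | [], _ => []
  | c :: rest, d =>
    d :: depthTable rest (d + (if c == '(' then 1 else 0) - (if c == ')' then 1 else 0))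

def strip_calls_alt (content : String) : String :=
  String.mk (((content.toList.zip (depthTable content.toList 0)).filter
      (fun cd => cd.2 == 0 || (cd.1 == ')' && cd.2 == 1))).map Prod.fst)

-- ===== PRECONDITION & SPEC =====
def Spec_strip_calls (content : String) (out : String) : Prop := out = strip_calls_alt content
instance (content : String) (out : String) : Decidable (Spec_strip_calls content out) := by unfold Spec_strip_calls; infer_instance

-- ===== CLAIM (what is proved, stated in full; the proofs are below) =====
def Claim_equal_strip_calls : Prop := ∀ (content : String), Dom_strip_calls content → Spec_strip_calls content (strip_calls content)

-- ===== LEMMAS AND PROOFS =====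

-- the common characterisation: keep char c at depth d iff d = 0 or (c = ')' and d = 1)
def gold : List Char → Int → List Char
  | [], _ => []
  | c :: rest, d =>
    (if d == 0 || (c == ')' && d == 1) then [c] else []) ++
      gold rest (d + (if c == '(' then 1 else 0) - (if c == ')' then 1 else 0))

theorem stripLoopA_eq_gold (cs : List Char) : ∀ (acc : List Char) (d : Int),
    stripLoopA cs acc d = acc ++ gold cs d := by
  induction cs with
  | nil => intro acc d; simp [stripLoopA, gold]
  | cons c rest ih =>
    intro acc d
    by_cases hp : c = '('
    · subst hp
      by_cases hd : d = 0 <;>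
        simp [stripLoopA, gold, hd, ih]
    · by_cases hq : c = ')'
      · subst hq
        simp only [stripLoopA, gold]
        by_cases hd : d = 0
        · simp [hd, ih]
        · by_cases hd1 : d = 1
          · simp [hd1, ih]
          · have : ¬ (d - 1 = 0) := by omega
            simp [hd, hd1, this, ih]
      · by_cases hd : d = 0 <;>
          simp [stripLoopA, gold, hp, hq, hd, ih]

theorem filter_zip_eq_gold (cs : List Char) : ∀ (d : Int),
    ((cs.zip (depthTable cs d)).filter
        (fun cd => cd.2 == 0 || (cd.1 == ')' && cd.2 == 1))).map Prod.fst
      = gold cs d := by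
  induction cs with
  | nil => intro d; simp [depthTable, gold]
  | cons c rest ih =>
    intro d
    simp only [depthTable, gold, List.zip_cons_cons, List.filter_cons]
    by_cases hd : d = 0
    · simp [hd, ih]
    · by_cases hc : c = ')'
      · by_cases hd1 : d = 1 <;> simp [hd, hc, hd1, ih]
      · simp [hd, hc, ih]

-- ===== VERDICT (by name: the statement is the Claim_ definition above) =====
theorem strip_calls_spec : Claim_equal_strip_calls := by
  intro content _
  unfold Spec_strip_calls strip_calls strip_calls_alt
  rw [stripLoopA_eq_gold, filter_zip_eq_gold]
  rfl
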